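-- pv_equiv track=rewrite | github.com/akpnim/LeetCode-Hards | 44. Wildcard Matching.py | posplits
-- ===== SOURCE A (Python) =====
-- def posplits(s,pivot):
--     fragments = []
--     for i in range(len(s)):
--         fragments.append(s[i:i+len(pivot)])
--     splits = []
--     for i,fragment in enumerate(fragments):
--         if fragment==pivot:
--             left = s[:i]
--             right = s[i+len(pivot)::]
--             splits.append([left,right])
--     return splits
-- ===== SOURCE B (Python) =====
-- def posplits(s, pivot):
--     splits = []
--     i = s.find(pivot)
--     while i != -1:
--         splits.append([s[:i], s[i + len(pivot):]])
--         i = s.find(pivot, i + 1)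
--     return splits
-- ===== Notes on version B (the rewrite author's own statement) =====
-- stated objective: faster
-- what changed: replaces A's two passes (materialise every length-m slice of s, then compare each against the pivot) with a single str.find loop that jumps from one occurrence to the next
-- intended difference: when pivot is the empty string A misses the occurrence of '' at the end of s and returns len(s) splits, while B also returns the final split [s, ''] — the intended value, since '' occurs at every position 0..len(s) — e.g. on posplits("a", ""): A returns [["", "a"]], B returns [["", "a"], ["a", ""]]
import Mathlib
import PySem

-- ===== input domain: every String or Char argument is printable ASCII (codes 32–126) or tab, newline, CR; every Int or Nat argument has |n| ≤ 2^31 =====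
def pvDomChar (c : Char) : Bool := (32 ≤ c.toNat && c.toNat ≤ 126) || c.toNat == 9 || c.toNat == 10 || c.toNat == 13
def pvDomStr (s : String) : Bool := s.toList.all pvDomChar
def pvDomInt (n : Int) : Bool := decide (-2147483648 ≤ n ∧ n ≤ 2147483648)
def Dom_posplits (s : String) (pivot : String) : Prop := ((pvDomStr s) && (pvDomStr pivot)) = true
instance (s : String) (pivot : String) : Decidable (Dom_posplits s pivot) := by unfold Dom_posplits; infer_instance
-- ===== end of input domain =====

-- B replaces A's two passes (build every length-m slice of s, then compare each against the pivot)
-- with a single str.find loop that jumps from occurrence to occurrence (constant-factor speed-up);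
-- on the empty pivot B additionally reports the occurrence at the very end of s (see D_posplits).

-- ===== PORT A =====
def posplits (s : String) (pivot : String) : List (List String) :=
  let cs := s.toList
  let p := pivot.toList
  let fragments : List (List Char) :=
    (PySem.List.pyRange 0 (cs.length : Int) 1).foldl
      (fun acc i => acc ++ [PySem.List.slice cs (some i) (some (i + (p.length : Int)))]) []
  let splits : List (List String) :=
    (PySem.List.enumerate fragments 0).foldl
      (fun acc pr =>
        if pr.2 = p then
          acc ++ [[String.ofList (PySem.List.slice cs none (some pr.1)),
                   String.ofList (PySem.List.slice cs (some (pr.1 + (p.length : Int))) none)]]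
        else acc) []
  splits

-- ===== PORT B =====
-- the 'while i != -1' loop of Source B; fuel only makes the recursion structural (len(s)+1 iterations suffice)
def posplitsAltLoop (cs p : List Char) (i : Int) (acc : List (List String)) (fuel : Nat) :
    List (List String) :=
  match fuel with
  | 0 => acc
  | fuel + 1 =>
    if i = -1 then acc
    else posplitsAltLoop cs p (PySem.Chars.findFrom cs p (i + 1) none)
          (acc ++ [[String.ofList (PySem.List.slice cs none (some i)),
                    String.ofList (PySem.List.slice cs (some (i + (p.length : Int))) none)]]) fuel

def posplits_alt (s : String) (pivot : String) : List (List String) :=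
  posplitsAltLoop s.toList pivot.toList (PySem.Chars.find s.toList pivot.toList) []
    (s.toList.length + 1)

-- ===== PRECONDITION & SPEC =====
-- When pivot is the empty string, A misses the occurrence of '' at the end of s (it returns len(s)
-- splits), while B also returns the final split [s, ''] — the intended value, since '' occurs at
-- every position 0..len(s).
def D_posplits (s : String) (pivot : String) : Prop := pivot = ""
instance (s : String) (pivot : String) : Decidable (D_posplits s pivot) := by
  unfold D_posplits; infer_instance

def Spec_posplits (s : String) (pivot : String) (out : List (List String)) : Prop :=
  ¬ D_posplits s pivot → out = posplits_alt s pivot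
instance (s : String) (pivot : String) (out : List (List String)) :
    Decidable (Spec_posplits s pivot out) := by unfold Spec_posplits; infer_instance

def pvDiffWitness_posplits : String × String := ("a", "")
def pvDiffWitnessOut_posplits : (List (List String)) × (List (List String)) :=
  ([["", "a"]], [["", "a"], ["a", ""]])

-- ===== CLAIM (what is proved, stated in full; the proofs are below) =====
def Claim_unchanged_posplits : Prop :=
  ∀ (s : String) (pivot : String), Dom_posplits s pivot → Spec_posplits s pivot (posplits s pivot)
def Claim_changed_posplits : Prop :=
  Dom_posplits (pvDiffWitness_posplits.1) (pvDiffWitness_posplits.2) ∧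
  D_posplits (pvDiffWitness_posplits.1) (pvDiffWitness_posplits.2) ∧
  posplits (pvDiffWitness_posplits.1) (pvDiffWitness_posplits.2) = pvDiffWitnessOut_posplits.1 ∧
  posplits_alt (pvDiffWitness_posplits.1) (pvDiffWitness_posplits.2) = pvDiffWitnessOut_posplits.2 ∧
  pvDiffWitnessOut_posplits.1 ≠ pvDiffWitnessOut_posplits.2
def Claim_exact_posplits : Prop :=
  ∀ (s : String) (pivot : String), Dom_posplits s pivot → D_posplits s pivot →
    posplits s pivot ≠ posplits_alt s pivot

-- ===== LEMMAS AND PROOFS =====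

-- the pair of surrounding pieces both programs build at a match position i
def pvOut (cs p : List Char) (i : Int) : List String :=
  [String.ofList (PySem.List.slice cs none (some i)),
   String.ofList (PySem.List.slice cs (some (i + (p.length : Int))) none)]

lemma frag_eq_iff (cs p : List Char) (k : Nat) :
    PySem.List.slice cs (some (k : Int)) (some ((k : Int) + (p.length : Int))) = p ↔
      p <+: cs.drop k := by
  rw [PySem.List.slice_natCast_add]
  constructor
  · intro h; exact h ▸ List.take_prefix _ _
  · intro h; exact ((List.prefix_iff_eq_take.mp h)).symm

lemma enumerate_map_cast_range {α : Type} (f : Int → α) (N : ℕ) :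
    PySem.List.enumerate (((List.range N).map (fun (k : Nat) => (k : Int))).map f) 0 =
      ((List.range N).map (fun (k : Nat) => (k : Int))).map (fun i => (i, f i)) := by
  induction N with
  | zero => simp [PySem.List.enumerate_nil]
  | succ N ih =>
    rw [List.range_succ, List.map_append, List.map_append, PySem.List.enumerate_append, ih]
    simp [PySem.List.enumerate_cons, PySem.List.enumerate_nil]

-- A's result as a filter/map over the index range
lemma posplits_eq (s pivot : String) :
    posplits s pivot =
      ((PySem.List.pyRange 0 (s.toList.length : Int) 1).filter
        (fun i => decide (PySem.List.slice s.toList (some i)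
            (some (i + (pivot.toList.length : Int))) = pivot.toList))).map
        (pvOut s.toList pivot.toList) := by
  simp only [posplits]
  rw [PySem.List.foldl_append_singleton_eq_map, List.nil_append]
  rw [PySem.List.pyRange_one 0 (s.toList.length : Int)]
  simp only [sub_zero, Int.toNat_natCast, zero_add]
  rw [enumerate_map_cast_range (fun i => PySem.List.slice s.toList (some i)
      (some (i + (pivot.toList.length : Int)))) s.toList.length]
  rw [PySem.List.foldl_append_ite (p := fun pr : Int × List Char => pr.2 = pivot.toList)
      (f := fun pr : Int × List Char =>
        [String.ofList (PySem.List.slice s.toList none (some pr.1)),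
         String.ofList (PySem.List.slice s.toList (some (pr.1 + (pivot.toList.length : Int))) none)])]
  rw [List.nil_append, List.filter_map, List.map_map]
  simp only [Function.comp_def]
  rfl

-- B's loop collects exactly the match positions ≥ k, for a nonempty pivot
lemma altLoop_spec (cs p : List Char) (hp : p ≠ []) :
    ∀ (fuel k : Nat) (acc : List (List String)), k ≤ cs.length →
      cs.length + 1 - k ≤ fuel →
      posplitsAltLoop cs p (PySem.Chars.findFrom cs p (k : Int) none) acc fuel =
        acc ++ ((PySem.List.pyRange (k : Int) (cs.length : Int) 1).filter
            (fun i => decide (p <+: cs.drop i.toNat))).map (pvOut cs p) := by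
  intro fuel
  induction fuel with
  | zero => intro k acc hk hf; omega
  | succ fuel ih =>
    intro k acc hk hf
    by_cases hj : PySem.Chars.findFrom cs p (k : Int) none = -1
    · have hnone : ∀ i ∈ PySem.List.pyRange (k : Int) (cs.length : Int) 1,
          ¬ p <+: cs.drop i.toNat := by
        intro i hi hpre
        rw [PySem.Chars.findFrom_natCast_eq_neg_one_iff cs p k hk] at hj
        apply hj
        rw [← PySem.Chars.isIn_iff_infix, ← PySem.Chars.exists_prefix_drop_iff_isIn]
        rw [PySem.List.mem_pyRange_one] at hi
        refine ⟨i.toNat - k, ?_⟩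
        rw [List.drop_drop]
        have h2 : k + (i.toNat - k) = i.toNat := by omega
        rw [h2]; exact hpre
      have hfil : (PySem.List.pyRange (k : Int) (cs.length : Int) 1).filter
          (fun i => decide (p <+: cs.drop i.toNat)) = [] := by
        apply List.filter_eq_nil_iff.mpr
        intro i hi; simpa using hnone i hi
      rw [hj, hfil]
      simp [posplitsAltLoop]
    · obtain ⟨hle, hpre, hmin⟩ := PySem.Chars.findFrom_natCast_spec cs p k hk hj
      set j := PySem.Chars.findFrom cs p (k : Int) none with hjdef
      have hj0 : 0 ≤ j := le_trans (by exact_mod_cast Nat.zero_le k) hle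
      have hjn : j.toNat < cs.length := by
        by_contra h
        have : cs.drop j.toNat = [] := List.drop_eq_nil_of_le (by omega)
        rw [this] at hpre
        exact hp (List.prefix_nil.mp hpre)
      have hjcast : j = ((j.toNat : Nat) : Int) := by omega
      -- unfold one loop step
      have step : posplitsAltLoop cs p j acc (fuel + 1) =
          posplitsAltLoop cs p (PySem.Chars.findFrom cs p (j + 1) none)
            (acc ++ [pvOut cs p j]) fuel := by
        simp only [posplitsAltLoop, if_neg hj, pvOut]
      rw [step]
      have hplus : j + 1 = (((j.toNat + 1 : Nat)) : Int) := by omega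
      rw [hplus, ih (j.toNat + 1) (acc ++ [pvOut cs p j]) (by omega) (by
        have : k ≤ j.toNat := by omega
        omega)]
      -- split the range at j
      have hcast1 : (((j.toNat + 1 : Nat)) : Int) = (j.toNat : Int) + 1 := by push_cast; ring
      have hsplit : PySem.List.pyRange (k : Int) (cs.length : Int) 1 =
          PySem.List.pyRange (k : Int) (j.toNat : Int) 1 ++
            ((j.toNat : Int) :: PySem.List.pyRange (((j.toNat + 1 : Nat)) : Int) (cs.length : Int) 1) := by
        rw [hcast1, ← PySem.List.pyRange_one_cons (by exact_mod_cast hjn)]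
        exact PySem.List.pyRange_one_append _ _ _ (by omega) (by exact_mod_cast hjn.le)
      rw [hsplit, List.filter_append]
      have hleft : (PySem.List.pyRange (k : Int) (j.toNat : Int) 1).filter
          (fun i => decide (p <+: cs.drop i.toNat)) = [] := by
        apply List.filter_eq_nil_iff.mpr
        intro i hi
        rw [PySem.List.mem_pyRange_one] at hi
        simp only [decide_eq_true_eq]
        exact hmin i.toNat (by omega) (by omega)
      rw [hleft, List.nil_append, List.filter_cons]
      simp only [Int.toNat_natCast, hpre, decide_true, if_pos]
      rw [List.map_cons, ← hjcast, List.append_assoc, List.singleton_append]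

-- B's loop on the empty pivot: one split for every position k..len(s)
lemma altLoop_empty (cs : List Char) :
    ∀ (fuel k : Nat) (acc : List (List String)), k ≤ cs.length →
      cs.length + 1 - k = fuel →
      posplitsAltLoop cs [] (PySem.Chars.findFrom cs [] (k : Int) none) acc fuel =
        acc ++ (PySem.List.pyRange (k : Int) ((cs.length : Int) + 1) 1).map (pvOut cs []) := by
  intro fuel
  induction fuel with
  | zero => intro k acc hk hf; omega
  | succ fuel ih =>
    intro k acc hk hf
    have hfk : PySem.Chars.findFrom cs [] (k : Int) none = (k : Int) := by
      rw [PySem.Chars.findFrom_natCast cs [] k hk, PySem.Chars.find_nil]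
      simp
    rw [hfk]
    have hkne : (k : Int) ≠ -1 := by omega
    have step : posplitsAltLoop cs [] (k : Int) acc (fuel + 1) =
        posplitsAltLoop cs [] (PySem.Chars.findFrom cs [] ((k : Int) + 1) none)
          (acc ++ [pvOut cs [] (k : Int)]) fuel := by
      simp only [posplitsAltLoop, if_neg hkne, pvOut, List.length_nil, Nat.cast_zero]
    rw [step]
    have hcons : PySem.List.pyRange (k : Int) ((cs.length : Int) + 1) 1 =
        (k : Int) :: PySem.List.pyRange ((k : Int) + 1) ((cs.length : Int) + 1) 1 :=
      PySem.List.pyRange_one_cons (by omega)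
    by_cases hkn : k = cs.length
    · have hfuel0 : fuel = 0 := by omega
      subst hfuel0
      have hnil : PySem.List.pyRange ((k : Int) + 1) ((cs.length : Int) + 1) 1 = [] :=
        PySem.List.pyRange_one_eq_nil (by omega)
      have h0 : ∀ (i : Int) (a : List (List String)), posplitsAltLoop cs [] i a 0 = a :=
        fun _ _ => rfl
      rw [h0, hcons, hnil]
      simp
    · have hplus : (k : Int) + 1 = (((k + 1 : Nat)) : Int) := by omega
      rw [hplus, ih (k + 1) _ (by omega) (by omega), hcons]
      rw [List.append_assoc, List.singleton_append, hplus, List.map_cons]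

lemma toList_ne_nil_of_ne_empty (pivot : String) (h : pivot ≠ "") : pivot.toList ≠ [] := by
  intro hnil
  apply h
  have h2 := congrArg String.ofList hnil
  rw [String.ofList_toList] at h2
  exact h2

lemma alt_eq (s pivot : String) (hp : pivot ≠ "") :
    posplits_alt s pivot =
      ((PySem.List.pyRange 0 (s.toList.length : Int) 1).filter
          (fun i => decide (pivot.toList <+: s.toList.drop i.toNat))).map
        (pvOut s.toList pivot.toList) := by
  unfold posplits_alt
  rw [← PySem.Chars.findFrom_zero]
  have h0 : (0 : Int) = ((0 : Nat) : Int) := rfl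
  rw [h0, altLoop_spec s.toList pivot.toList (toList_ne_nil_of_ne_empty pivot hp)
      (s.toList.length + 1) 0 [] (Nat.zero_le _) (by omega)]
  simp

-- ===== VERDICT (by name: the statement is the Claim_ definition above) =====
theorem posplits_spec : Claim_unchanged_posplits := by
  intro s pivot _ hD
  have hp : pivot ≠ "" := fun h => hD h
  rw [posplits_eq, alt_eq s pivot hp]
  apply congrArg
  apply List.filter_congr
  intro i hi
  rw [PySem.List.mem_pyRange_one] at hi
  have : i = ((i.toNat : Nat) : Int) := by omega
  rw [this]
  simp only [decide_eq_decide]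
  exact frag_eq_iff s.toList pivot.toList i.toNat

theorem posplits_changed : Claim_changed_posplits := by
  unfold Claim_changed_posplits; decide

theorem posplits_tight : Claim_exact_posplits := by
  intro s pivot _ hD
  unfold D_posplits at hD
  subst hD
  intro heq
  have hA : posplits s "" =
      ((PySem.List.pyRange 0 (s.toList.length : Int) 1).filter
        (fun i => decide (PySem.List.slice s.toList (some i) (some (i + 0)) = []))).map
        (pvOut s.toList []) := by
    have := posplits_eq s ""
    simpa using this
  have hAfull : (PySem.List.pyRange 0 (s.toList.length : Int) 1).filter
      (fun i => decide (PySem.List.slice s.toList (some i) (some (i + 0)) = [])) =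
      PySem.List.pyRange 0 (s.toList.length : Int) 1 := by
    apply List.filter_eq_self.mpr
    intro i hi
    rw [PySem.List.mem_pyRange_one] at hi
    have hcast : i = ((i.toNat : Nat) : Int) := by omega
    rw [hcast]
    have h0 : ((i.toNat : Nat) : Int) + 0 = ((i.toNat : Nat) : Int) + ((0 : Nat) : Int) := by simp
    rw [h0, PySem.List.slice_natCast_add]
    simp
  have hB : posplits_alt s "" =
      (PySem.List.pyRange 0 ((s.toList.length : Int) + 1) 1).map (pvOut s.toList []) := by
    unfold posplits_alt
    have hnilstr : ("" : String).toList = [] := rfl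
    rw [hnilstr, ← PySem.Chars.findFrom_zero]
    have h0 : (0 : Int) = ((0 : Nat) : Int) := rfl
    rw [h0, altLoop_empty s.toList (s.toList.length + 1) 0 [] (Nat.zero_le _) (by omega)]
    simp
  have hlenA : (posplits s "").length = s.toList.length := by
    rw [hA, hAfull, List.length_map, PySem.List.length_pyRange_one]
    omega
  have hlenB : (posplits_alt s "").length = s.toList.length + 1 := by
    rw [hB, List.length_map, PySem.List.length_pyRange_one]
    omega
  rw [heq, hlenB] at hlenA
  omega
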